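-- pv_equiv track=rewrite | github.com/felicabrera/lightsout | src/lights_out.py | simulate_press
-- ===== SOURCE A (Python) =====
-- def simulate_press(board, presses):
--     """
--     Simulates pressing the lights according to the solution and returns the final board.
--
--     Args:
--         board (list of list of int): Original board.
--         presses (list of int): Which lights to press (1=press, 0=don't).
--
--     Returns:
--         list of list of int: Final board state.
--     """
--     n = len(board)
--     result = [row[:] for row in board]
--
--     for i, press in enumerate(presses):
--         if press == 1:
--             r, c = divmod(i, n)
--             # Toggle self and adjacent
--             positions = [(r, c)]
--             if r > 0: positions.append((r-1, c))
--             if r < n-1: positions.append((r+1, c))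
--             if c > 0: positions.append((r, c-1))
--             if c < n-1: positions.append((r, c+1))
--             for pr, pc in positions:
--                 result[pr][pc] ^= 1
--
--     return result
-- ===== SOURCE B (Python) =====
-- def simulate_press(board, presses):
--     """Gather version: for each grid cell, count the presses that toggle it and
--     flip the cell once iff that count is odd (cells outside the n x n grid are
--     never toggled by a press, so they are copied unchanged)."""
--     n = len(board)
--     result = []
--     for r, row in enumerate(board):
--         new_row = []
--         for c, v in enumerate(row):
--             cnt = 0
--             if c < n:
--                 for pr, pc in ((r, c), (r - 1, c), (r + 1, c), (r, c - 1), (r, c + 1)):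
--                     if 0 <= pr < n and 0 <= pc < n:
--                         idx = pr * n + pc
--                         if idx < len(presses) and presses[idx] == 1:
--                             cnt += 1
--             new_row.append(v ^ 1 if cnt % 2 else v)
--         result.append(new_row)
--     return result
-- ===== Notes on version B (the rewrite author's own statement) =====
-- stated objective: alternative
-- what changed: B gathers per output cell (counting the parity of the up-to-five presses that affect each cell, mapping grid positions back to press indices) instead of A's scatter loop that toggles neighbours for every press; presses with index beyond the n*n grid or hitting missing cells of a ragged board make A raise IndexError/ZeroDivisionError and are excluded by Pre_.
import Mathlib
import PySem

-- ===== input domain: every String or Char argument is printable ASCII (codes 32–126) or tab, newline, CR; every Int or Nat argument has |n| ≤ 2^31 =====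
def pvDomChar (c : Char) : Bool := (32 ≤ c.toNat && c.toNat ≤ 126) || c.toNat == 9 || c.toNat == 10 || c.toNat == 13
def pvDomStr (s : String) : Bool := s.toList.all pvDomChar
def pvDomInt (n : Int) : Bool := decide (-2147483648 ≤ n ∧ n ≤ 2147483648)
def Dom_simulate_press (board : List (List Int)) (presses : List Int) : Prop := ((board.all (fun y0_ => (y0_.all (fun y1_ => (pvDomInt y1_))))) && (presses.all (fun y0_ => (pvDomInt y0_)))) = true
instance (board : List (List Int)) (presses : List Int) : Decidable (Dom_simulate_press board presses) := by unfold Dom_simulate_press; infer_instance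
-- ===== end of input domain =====

-- B re-implements the Lights-Out press simulation by GATHERING per output cell (parity of the
-- up-to-five presses affecting it) instead of A's SCATTER loop toggling neighbours per press;
-- equal return values are proved on Pre_, which excludes exactly the inputs where A raises.

-- ===== PORT A =====
-- `result[pr][pc] ^= 1`; indices reaching this in A are ≥ 0 (quotient/remainder of a
-- non-negative index by n with the `r > 0`/`c > 0` guards), so `.toNat` is exact there;
-- out-of-range indices (Python IndexError) are excluded by Pre_.
def pyToggle (res : List (List Int)) (pr pc : Int) : List (List Int) :=
  res.modify pr.toNat (fun row => row.modify pc.toNat (fun v => PySem.Int.bxor v 1))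

-- the `positions` list A builds for a press at (r, c)
def pyPositions (n r c : Int) : List (Int × Int) :=
  [(r, c)] ++ (if r > 0 then [(r - 1, c)] else []) ++ (if r < n - 1 then [(r + 1, c)] else [])
    ++ (if c > 0 then [(r, c - 1)] else []) ++ (if c < n - 1 then [(r, c + 1)] else [])

-- body of A's `for i, press in enumerate(presses)` loop; `divmod(i, n)` is total
-- floordiv/mod here — Python's ZeroDivisionError (n = 0 with a press) is excluded by Pre_
def pyPressStep (n : Int) (res : List (List Int)) (ip : Int × Int) : List (List Int) :=
  if ip.2 = 1 then
    ((pyPositions n (PySem.Int.floordiv ip.1 n) (PySem.Int.mod ip.1 n)).foldl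
      (fun s pq => pyToggle s pq.1 pq.2) res)
  else res

def simulate_press (board : List (List Int)) (presses : List Int) : List (List Int) :=
  let n : Int := board.length
  let result := board.map (fun row => row)   -- result = [row[:] for row in board]
  (PySem.List.enumerate presses).foldl (pyPressStep n) result

-- ===== PORT B =====
-- B's inner loop: count, among the five grid positions that toggle cell (r, c), those that
-- are in bounds and whose press entry is 1
def altCount (n : Int) (presses : List Int) (r c : Int) : Int :=
  if c < n then
    ([(r, c), (r - 1, c), (r + 1, c), (r, c - 1), (r, c + 1)] : List (Int × Int)).foldl
      (fun cnt pq =>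
        if 0 ≤ pq.1 ∧ pq.1 < n ∧ 0 ≤ pq.2 ∧ pq.2 < n then
          (if pq.1 * n + pq.2 < (presses.length : Int) ∧
              PySem.List.pyGetD presses (pq.1 * n + pq.2) 0 = 1 then cnt + 1 else cnt)
        else cnt) 0
  else 0

def simulate_press_alt (board : List (List Int)) (presses : List Int) : List (List Int) :=
  let n : Int := board.length
  (PySem.List.enumerate board).map (fun rrow =>
    (PySem.List.enumerate rrow.2).map (fun cv =>
      let cnt := altCount n presses rrow.1 cv.1
      if PySem.Int.mod cnt 2 ≠ 0 then PySem.Int.bxor cv.2 1 else cv.2))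

-- ===== PRECONDITION & SPEC =====
def pvCellOK (board : List (List Int)) (r c : Nat) : Prop := c < (board.getD r []).length

-- Pre_ excludes exactly the inputs on which A raises: a press whose index is outside the
-- n*n grid (IndexError; any press at all when the board is empty, ZeroDivisionError), or a
-- press one of whose five toggle targets falls beyond the end of a (ragged) row (IndexError).
def Pre_simulate_press (board : List (List Int)) (presses : List Int) : Prop :=
  ∀ i < presses.length, presses.getD i 0 = 1 →
    i < board.length * board.length ∧
    pvCellOK board (i / board.length) (i % board.length) ∧
    (0 < i / board.length → pvCellOK board (i / board.length - 1) (i % board.length)) ∧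
    (i / board.length + 1 < board.length → pvCellOK board (i / board.length + 1) (i % board.length)) ∧
    (0 < i % board.length → pvCellOK board (i / board.length) (i % board.length - 1)) ∧
    (i % board.length + 1 < board.length → pvCellOK board (i / board.length) (i % board.length + 1))
instance (board : List (List Int)) (presses : List Int) : Decidable (Pre_simulate_press board presses) := by
  unfold Pre_simulate_press pvCellOK; infer_instance

def pvWitness_simulate_press : List (List Int) × List Int := ([[0, 1], [1, 0]], [1, 0, 0, 1])

def Spec_simulate_press (board : List (List Int)) (presses : List Int) (out : List (List Int)) : Prop := out = simulate_press_alt board presses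
instance (board : List (List Int)) (presses : List Int) (out : List (List Int)) : Decidable (Spec_simulate_press board presses out) := by unfold Spec_simulate_press; infer_instance

-- ===== CLAIM (what is proved, stated in full; the proofs are below) =====
def Claim_equal_simulate_press : Prop := ∀ (board : List (List Int)) (presses : List Int), Dom_simulate_press board presses → Pre_simulate_press board presses → Spec_simulate_press board presses (simulate_press board presses)

-- ===== LEMMAS AND PROOFS =====

-- x ^ 1 ^ 1 = x for Python ints
theorem pv_bxor_one_inv (x : Int) : PySem.Int.bxor (PySem.Int.bxor x 1) 1 = x := by
  unfold PySem.Int.bxor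
  rcases x with n | n
  · simp [Int.toNat, Nat.xor_xor_cancel_right]
  · have h : ¬ (0 : Int) ≤ Int.negSucc n := by omega
    have h2 : (-Int.negSucc n - 1).toNat = n := by omega
    have h3 : ¬ (0:Int) ≤ -((n ^^^ 1 : Nat) : Int) - 1 := by
      have := Nat.cast_nonneg (α := Int) (n ^^^ 1); omega
    have h4 : (-(-((n ^^^ 1 : Nat) : Int) - 1) - 1).toNat = n ^^^ 1 := by omega
    simp only [h, if_false, show (0:Int) ≤ 1 by omega, if_true, h2, Int.toNat_one,
      h3, h4, Nat.xor_xor_cancel_right]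
    omega

-- Nat-level picture of the five toggle positions of a press at (r, c)
def candN (n r c : Nat) : List (Nat × Nat) :=
  [(r, c)] ++ (if 0 < r then [(r - 1, c)] else []) ++ (if r + 1 < n then [(r + 1, c)] else [])
    ++ (if 0 < c then [(r, c - 1)] else []) ++ (if c + 1 < n then [(r, c + 1)] else [])

def grid (res : List (List Int)) (r c : Nat) : Int := (res.getD r []).getD c 0

def pvFlip (k : Nat) (x : Int) : Int := if k % 2 = 1 then PySem.Int.bxor x 1 else x

theorem mem_candN {n r c a b : Nat} :
    (a, b) ∈ candN n r c ↔
      (a = r ∧ b = c) ∨ (0 < r ∧ a = r - 1 ∧ b = c) ∨ (r + 1 < n ∧ a = r + 1 ∧ b = c) ∨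
      (0 < c ∧ a = r ∧ b = c - 1) ∨ (c + 1 < n ∧ a = r ∧ b = c + 1) := by
  simp only [candN, List.mem_append, List.mem_singleton, List.mem_ite_nil_right,
    Prod.mk.injEq]
  tauto

theorem candN_nodup (n r c : Nat) : (candN n r c).Nodup := by
  simp only [candN]
  split_ifs <;> simp_all [Prod.ext_iff] <;> omega

theorem candN_symm {n r c a b : Nat} (hr : r < n) (hc : c < n) (ha : a < n) (hb : b < n) :
    ((a, b) ∈ candN n r c) ↔ ((r, c) ∈ candN n a b) := by
  simp only [mem_candN]; omega

theorem candN_bounds {n r c : Nat} (hr : r < n) (hc : c < n) :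
    ∀ p ∈ candN n r c, p.1 < n ∧ p.2 < n := by
  rintro ⟨a, b⟩ hp
  rw [mem_candN] at hp; omega

theorem pyPositions_eq (n r c : Nat) :
    pyPositions (n : Int) (r : Int) (c : Int) =
      (candN n r c).map (fun p => ((p.1 : Int), (p.2 : Int))) := by
  have e1 : ((r:Int) > 0) ↔ 0 < r := by omega
  have e2 : ((r:Int) < (n:Int) - 1) ↔ r + 1 < n := by omega
  have e3 : ((c:Int) > 0) ↔ 0 < c := by omega
  have e4 : ((c:Int) < (n:Int) - 1) ↔ c + 1 < n := by omega
  simp only [pyPositions, candN, e1, e2, e3, e4, List.map_append, List.map_cons, List.map_nil,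
    apply_ite (List.map (fun p : Nat × Nat => ((p.1 : Int), (p.2 : Int))))]
  by_cases h1 : 0 < r <;> by_cases h2 : r + 1 < n <;> by_cases h3 : 0 < c <;>
    by_cases h4 : c + 1 < n <;>
    simp [h1, h2, h3, h4]

-- the Nat-level single-toggle step
def setN (res : List (List Int)) (p : Nat × Nat) : List (List Int) :=
  res.modify p.1 (fun row => row.modify p.2 (fun v => PySem.Int.bxor v 1))

theorem setN_length (res : List (List Int)) (p : Nat × Nat) :
    (setN res p).length = res.length := by
  simp [setN]

theorem setN_rowlen (res : List (List Int)) (p : Nat × Nat) (r : Nat) :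
    ((setN res p).getD r []).length = (res.getD r []).length := by
  unfold setN
  by_cases hr : r < res.length
  · rw [List.getD_eq_getElem _ _ (by simpa using hr), List.getD_eq_getElem _ _ hr,
      List.getElem_modify]
    split <;> simp
  · rw [List.getD_eq_default _ _ (by simpa using Nat.le_of_not_lt hr),
      List.getD_eq_default _ _ (Nat.le_of_not_lt hr)]

theorem grid_setN (res : List (List Int)) (p : Nat × Nat) (r c : Nat)
    (hr : r < res.length) (hc : c < (res.getD r []).length) :
    grid (setN res p) r c =
      if p.1 = r ∧ p.2 = c then PySem.Int.bxor (grid res r c) 1 else grid res r c := by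
  unfold grid setN
  have hlen : r < (res.modify p.1 (fun row => row.modify p.2 (fun v => PySem.Int.bxor v 1))).length := by
    simpa using hr
  rw [List.getD_eq_getElem _ [] hlen, List.getElem_modify]
  rw [List.getD_eq_getElem res _ hr] at hc ⊢
  by_cases h1 : p.1 = r
  · simp only [h1, eq_self_iff_true, if_true, true_and]
    have hlen2 : c < (res[r].modify p.2 (fun v => PySem.Int.bxor v 1)).length := by simpa using hc
    rw [List.getD_eq_getElem _ _ hlen2, List.getElem_modify]
    by_cases h2 : p.2 = c
    · simp [h2, List.getElem?_eq_getElem hc]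
    · simp [h2, List.getElem?_eq_getElem hc]
  · simp [h1, List.getD_eq_getElem _ _ hc]

theorem flip_succ_bxor (k : Nat) (x : Int) :
    pvFlip k (PySem.Int.bxor x 1) = pvFlip (k + 1) x := by
  unfold pvFlip
  rcases Nat.mod_two_eq_zero_or_one k with h | h <;>
    simp [h, Nat.add_mod, pv_bxor_one_inv]

theorem flip_add (a b : Nat) (x : Int) : pvFlip a (pvFlip b x) = pvFlip (a + b) x := by
  unfold pvFlip
  rcases Nat.mod_two_eq_zero_or_one a with ha | ha <;>
    rcases Nat.mod_two_eq_zero_or_one b with hb | hb <;>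
      simp [ha, hb, Nat.add_mod, pv_bxor_one_inv]

theorem foldl_setN_length (L : List (Nat × Nat)) (res : List (List Int)) :
    (L.foldl setN res).length = res.length := by
  induction L generalizing res with
  | nil => rfl
  | cons p L ih => simp [List.foldl_cons, ih, setN_length]

theorem foldl_setN_rowlen (L : List (Nat × Nat)) (res : List (List Int)) (r : Nat) :
    ((L.foldl setN res).getD r []).length = ((res.getD r []).length) := by
  induction L generalizing res with
  | nil => rfl
  | cons p L ih => rw [List.foldl_cons, ih, setN_rowlen]

theorem grid_foldl_setN (L : List (Nat × Nat)) (res : List (List Int)) (r c : Nat)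
    (hr : r < res.length) (hc : c < (res.getD r []).length) :
    grid (L.foldl setN res) r c = pvFlip (L.count (r, c)) (grid res r c) := by
  induction L generalizing res with
  | nil => simp [pvFlip]
  | cons p L ih =>
      rw [List.foldl_cons, ih (setN res p) (by rw [setN_length]; exact hr)
        (by rw [setN_rowlen]; exact hc)]
      rw [grid_setN res p r c hr hc, List.count_cons]
      by_cases hp : p = (r, c)
      · have hpc : p.1 = r ∧ p.2 = c := by subst hp; exact ⟨rfl, rfl⟩
        rw [if_pos hpc, hp]
        simp only [beq_self_eq_true, if_true]
        rw [flip_succ_bxor]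
      · have h2 : ¬ (p.1 = r ∧ p.2 = c) := by
          intro h; exact hp (Prod.ext h.1 h.2)
        simp [h2, hp]

-- number of presses (with index < n*n) in es that toggle cell (r, c)
def cntE (n : Nat) (r c : Nat) (es : List (Int × Int)) : Nat :=
  (es.map (fun q => if q.2 = 1 then (candN n (q.1.toNat / n) (q.1.toNat % n)).count (r, c) else 0)).sum

theorem toggle_fold_eq_setN (L : List (Int × Int)) (res : List (List Int)) :
    L.foldl (fun s pq => pyToggle s pq.1 pq.2) res =
      (L.map (fun pq => (pq.1.toNat, pq.2.toNat))).foldl setN res := by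
  rw [List.foldl_map]
  rfl

theorem stepA_length (n : Int) (res : List (List Int)) (q : Int × Int) :
    (pyPressStep n res q).length = res.length := by
  unfold pyPressStep
  split
  · rw [toggle_fold_eq_setN, foldl_setN_length]
  · rfl

theorem stepA_rowlen (n : Int) (res : List (List Int)) (q : Int × Int) (r : Nat) :
    ((pyPressStep n res q).getD r []).length = ((res.getD r []).length) := by
  unfold pyPressStep
  split
  · rw [toggle_fold_eq_setN, foldl_setN_rowlen]
  · rfl

theorem grid_foldA (n : Nat) (es : List (Int × Int)) (res : List (List Int)) (r c : Nat)
    (hres : res.length = n)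
    (hr : r < res.length) (hc : c < (res.getD r []).length)
    (hok : ∀ q ∈ es, q.2 = 1 → ∃ k : Nat, q.1 = (k : Int) ∧ k < n * n) :
    grid (es.foldl (pyPressStep (n : Int)) res) r c = pvFlip (cntE n r c es) (grid res r c) := by
  induction es generalizing res with
  | nil => simp [cntE, pvFlip]
  | cons q es ih =>
      rw [List.foldl_cons,
        ih (pyPressStep (n : Int) res q) (by rw [stepA_length]; exact hres)
          (by rw [stepA_length]; exact hr) (by rw [stepA_rowlen]; exact hc)
          (fun q' hq' => hok q' (List.mem_cons_of_mem _ hq'))]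
      have hstep : grid (pyPressStep (n : Int) res q) r c =
          pvFlip (if q.2 = 1 then
              (candN n (q.1.toNat / n) (q.1.toNat % n)).count (r, c) else 0) (grid res r c) := by
        unfold pyPressStep
        by_cases h1 : q.2 = 1
        · obtain ⟨k, hk1, hk2⟩ := hok q (List.mem_cons_self) h1
          have hn : 0 < n := by by_contra h; omega
          rw [if_pos h1, hk1, PySem.Int.floordiv_natCast, PySem.Int.mod_natCast,
            pyPositions_eq, toggle_fold_eq_setN, List.map_map]
          have hmap : ((fun pq : Int × Int => (pq.1.toNat, pq.2.toNat)) ∘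
              (fun p : Nat × Nat => ((p.1 : Int), (p.2 : Int)))) = id := by
            funext p; simp
          rw [hmap, List.map_id]
          rw [grid_foldl_setN _ res r c hr hc]
          simp [h1, hk1]
        · rw [if_neg h1, if_neg h1]
          simp [pvFlip]
      rw [hstep, flip_add]
      have : cntE n r c (q :: es) =
          (if q.2 = 1 then (candN n (q.1.toNat / n) (q.1.toNat % n)).count (r, c) else 0)
            + cntE n r c es := by
        simp [cntE]
      rw [this, Nat.add_comm]

-- ===== the counting bridge =====

theorem divmod_pair_iff {k n a b : Nat} (hn : 0 < n) (hb : b < n) :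
    ((k / n, k % n) = (a, b)) ↔ k = a * n + b := by
  rw [Prod.mk.injEq]
  constructor
  · rintro ⟨h1, h2⟩
    have h3 := Nat.div_add_mod k n
    have h4 : (k / n) * n = n * (k / n) := Nat.mul_comm _ _
    subst h1 h2
    omega
  · rintro rfl
    refine ⟨?_, ?_⟩
    · rw [Nat.mul_comm a n, Nat.mul_add_div hn, Nat.div_eq_of_lt hb]
      omega
    · rw [Nat.mul_comm a n, Nat.mul_add_mod, Nat.mod_eq_of_lt hb]

theorem countP_or_disjoint {α : Type} (l : List α) (A B : α → Prop)
    [DecidablePred A] [DecidablePred B] (h : ∀ x, ¬ (A x ∧ B x)) :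
    l.countP (fun x => decide (A x) || decide (B x)) =
      l.countP (fun x => decide (A x)) + l.countP (fun x => decide (B x)) := by
  induction l with
  | nil => rfl
  | cons x l ih =>
      by_cases hA : A x
      · by_cases hB : B x
        · exact absurd ⟨hA, hB⟩ (h x)
        · simp [List.countP_cons, ih, hA, hB]; omega
      · by_cases hB : B x <;> simp [List.countP_cons, ih, hA, hB] <;> omega
  -- used only here: a countP over a disjunction of pointwise-disjoint predicates splits

theorem countP_eq_single (len k0 : Nat) (Q : Nat → Prop) [DecidablePred Q] :
    (List.range len).countP (fun k => decide (Q k ∧ k = k0)) =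
      if k0 < len ∧ Q k0 then 1 else 0 := by
  induction len with
  | zero => simp
  | succ m ih =>
      rw [List.range_succ, List.countP_append, ih]
      simp only [List.countP_cons, List.countP_nil]
      by_cases hk : k0 = m
      · subst hk
        by_cases hq : Q k0 <;> simp [hq]
      · have hno : ¬ (Q m ∧ m = k0) := fun h => hk h.2.symm
        by_cases hq : Q k0 <;> simp [hno, hq] <;> split_ifs <;> omega

theorem bridge_count (n len : Nat) (presses : List Int) (S : List (Nat × Nat))
    (hnd : S.Nodup) (hb : ∀ p ∈ S, p.1 < n ∧ p.2 < n) :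
    (List.range len).countP
        (fun k => decide (presses.getD k 0 = 1 ∧ (k / n, k % n) ∈ S)) =
      S.countP (fun p => decide (p.1 * n + p.2 < len ∧ presses.getD (p.1 * n + p.2) 0 = 1)) := by
  induction S with
  | nil => simp
  | cons p S ih =>
      obtain ⟨p1, p2⟩ := p
      have hp := hb (p1, p2) List.mem_cons_self
      have hn : 0 < n := Nat.lt_of_le_of_lt (Nat.zero_le _) hp.1
      have hstep1 : (List.range len).countP
          (fun k => decide (presses.getD k 0 = 1 ∧ (k / n, k % n) ∈ (p1, p2) :: S)) =
        (List.range len).countP (fun k => decide (presses.getD k 0 = 1 ∧ (k / n, k % n) = (p1, p2)))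
          + (List.range len).countP (fun k => decide (presses.getD k 0 = 1 ∧ (k / n, k % n) ∈ S)) := by
        rw [← countP_or_disjoint (List.range len)
            (fun k => presses.getD k 0 = 1 ∧ (k / n, k % n) = (p1, p2))
            (fun k => presses.getD k 0 = 1 ∧ (k / n, k % n) ∈ S)
            (fun k hk => (List.nodup_cons.mp hnd).1 (hk.1.2 ▸ hk.2.2))]
        refine List.countP_congr (fun k _ => ?_)
        simp [List.mem_cons]
        tauto
      have hsingle : (List.range len).countP
            (fun k => decide (presses.getD k 0 = 1 ∧ (k / n, k % n) = (p1, p2))) =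
          if p1 * n + p2 < len ∧ presses.getD (p1 * n + p2) 0 = 1 then 1 else 0 := by
        rw [← countP_eq_single len (p1 * n + p2) (fun k => presses.getD k 0 = 1)]
        refine List.countP_congr (fun k _ => ?_)
        simp [divmod_pair_iff hn hp.2]
      rw [hstep1, hsingle,
        ih (List.nodup_cons.mp hnd).2 (fun q hq => hb q (List.mem_cons_of_mem _ hq)),
        List.countP_cons, Nat.add_comm]
      split_ifs with h1 h2 <;> simp_all

-- ===== A-side characterisation on the original board =====

def cntA (board : List (List Int)) (presses : List Int) (r c : Nat) : Nat :=
  ((List.range presses.length).map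
    (fun k => if presses.getD k 0 = 1 then
        (candN board.length (k / board.length) (k % board.length)).count (r, c) else 0)).sum

theorem grid_A (board : List (List Int)) (presses : List Int)
    (hpre : Pre_simulate_press board presses) (r c : Nat)
    (hr : r < board.length) (hc : c < (board.getD r []).length) :
    grid (simulate_press board presses) r c = pvFlip (cntA board presses r c) (grid board r c) := by
  unfold simulate_press
  rw [List.map_id']
  rw [grid_foldA board.length (PySem.List.enumerate presses) board r c rfl hr hc ?hok]
  case hok =>
    rintro q hq h1
    rw [PySem.List.mem_enumerate_iff] at hq
    obtain ⟨k, hk, rfl⟩ := hq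
    refine ⟨k, by simp, ?_⟩
    have := (hpre k hk (by simp_all [List.getD_eq_getElem, h1])).1
    exact this
  congr 1
  unfold cntE cntA
  rw [PySem.List.enumerate_eq_map_pyRange presses 0, PySem.List.len_eq,
    PySem.List.pyRange_zero_natCast, List.map_map, List.map_map]
  exact congrArg List.sum (List.map_congr_left (fun k hk => by
    simp [PySem.List.pyGetD_natCast, Function.comp]))

-- ===== B-side characterisation =====

def cntB (board : List (List Int)) (presses : List Int) (r c : Nat) : Nat :=
  if c < board.length then
    (candN board.length r c).countP
      (fun p => decide (p.1 * board.length + p.2 < presses.length ∧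
        presses.getD (p.1 * board.length + p.2) 0 = 1))
  else 0

theorem altCount_eq (board : List (List Int)) (presses : List Int) (r c : Nat)
    (hr : r < board.length) :
    altCount (board.length : Int) presses (r : Int) (c : Int) =
      ((cntB board presses r c : Nat) : Int) := by
  unfold altCount cntB
  by_cases hcn : c < board.length
  · rw [if_pos (by exact_mod_cast hcn), if_pos hcn]
    set n := board.length with hn
    set len := presses.length with hlen
    -- additive form of the fold
    have hstep : (fun (cnt : Int) (pq : Int × Int) =>
        if 0 ≤ pq.1 ∧ pq.1 < (n : Int) ∧ 0 ≤ pq.2 ∧ pq.2 < (n : Int) then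
          (if pq.1 * (n : Int) + pq.2 < (len : Int) ∧
              PySem.List.pyGetD presses (pq.1 * (n : Int) + pq.2) 0 = 1 then cnt + 1 else cnt)
        else cnt) = (fun cnt pq => cnt +
          (if (0 ≤ pq.1 ∧ pq.1 < (n : Int) ∧ 0 ≤ pq.2 ∧ pq.2 < (n : Int)) ∧
              pq.1 * (n : Int) + pq.2 < (len : Int) ∧
              PySem.List.pyGetD presses (pq.1 * (n : Int) + pq.2) 0 = 1 then 1 else 0)) := by
      funext cnt pq
      split_ifs <;> omega
    rw [hstep, PySem.List.foldl_add]
    -- indicator of one candidate, Nat side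
    have hterm : ∀ a b : Nat, a < n → b < n →
        (if (0 ≤ ((a : Nat) : Int) ∧ ((a : Nat) : Int) < (n : Int) ∧ 0 ≤ ((b : Nat) : Int) ∧ ((b : Nat) : Int) < (n : Int)) ∧
            ((a : Nat) : Int) * (n : Int) + ((b : Nat) : Int) < (len : Int) ∧
            PySem.List.pyGetD presses (((a : Nat) : Int) * (n : Int) + ((b : Nat) : Int)) 0 = 1 then (1 : Int) else 0)
          = if a * n + b < len ∧ presses.getD (a * n + b) 0 = 1 then (1 : Int) else 0 := by
      intro a b ha hb
      have hcast : ((a : Nat) : Int) * (n : Int) + ((b : Nat) : Int) = ((a * n + b : Nat) : Int) := by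
        push_cast; ring
      rw [hcast, PySem.List.pyGetD_natCast]
      have e1 : ((0:Int) ≤ (a:Int) ∧ (a:Int) < (n:Int) ∧ (0:Int) ≤ (b:Int) ∧ (b:Int) < (n:Int)) ↔ True := by
        simp; omega
      have e2 : (((a * n + b : Nat) : Int) < (len : Int)) ↔ (a * n + b < len) := by omega
      simp only [e1, e2, true_and]
    have Hself := hterm r c hr hcn
    have Hup : (if ((0:Int) ≤ (r:Int) - 1 ∧ (r:Int) - 1 < (n:Int) ∧ (0:Int) ≤ (c:Int) ∧ (c:Int) < (n:Int)) ∧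
          ((r:Int) - 1) * (n:Int) + (c:Int) < (len:Int) ∧
          PySem.List.pyGetD presses (((r:Int) - 1) * (n:Int) + (c:Int)) 0 = 1 then (1:Int) else 0)
        = if 0 < r then (if (r-1) * n + c < len ∧ presses.getD ((r-1) * n + c) 0 = 1 then (1:Int) else 0) else 0 := by
      by_cases h1 : 0 < r
      · have hc1 : ((r:Int) - 1) = ((r - 1 : Nat) : Int) := by omega
        rw [hc1, hterm (r-1) c (by omega) hcn, if_pos h1]
      · rw [if_neg h1, if_neg (by omega)]
    have Hdown : (if ((0:Int) ≤ (r:Int) + 1 ∧ (r:Int) + 1 < (n:Int) ∧ (0:Int) ≤ (c:Int) ∧ (c:Int) < (n:Int)) ∧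
          ((r:Int) + 1) * (n:Int) + (c:Int) < (len:Int) ∧
          PySem.List.pyGetD presses (((r:Int) + 1) * (n:Int) + (c:Int)) 0 = 1 then (1:Int) else 0)
        = if r + 1 < n then (if (r+1) * n + c < len ∧ presses.getD ((r+1) * n + c) 0 = 1 then (1:Int) else 0) else 0 := by
      by_cases h2 : r + 1 < n
      · have hc1 : ((r:Int) + 1) = ((r + 1 : Nat) : Int) := by omega
        rw [hc1, hterm (r+1) c (by omega) hcn, if_pos h2]
      · rw [if_neg h2, if_neg (by omega)]
    have Hleft : (if ((0:Int) ≤ (r:Int) ∧ (r:Int) < (n:Int) ∧ (0:Int) ≤ (c:Int) - 1 ∧ (c:Int) - 1 < (n:Int)) ∧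
          (r:Int) * (n:Int) + ((c:Int) - 1) < (len:Int) ∧
          PySem.List.pyGetD presses ((r:Int) * (n:Int) + ((c:Int) - 1)) 0 = 1 then (1:Int) else 0)
        = if 0 < c then (if r * n + (c-1) < len ∧ presses.getD (r * n + (c-1)) 0 = 1 then (1:Int) else 0) else 0 := by
      by_cases h3 : 0 < c
      · have hc1 : ((c:Int) - 1) = ((c - 1 : Nat) : Int) := by omega
        rw [hc1, hterm r (c-1) hr (by omega), if_pos h3]
      · rw [if_neg h3, if_neg (by omega)]
    have Hright : (if ((0:Int) ≤ (r:Int) ∧ (r:Int) < (n:Int) ∧ (0:Int) ≤ (c:Int) + 1 ∧ (c:Int) + 1 < (n:Int)) ∧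
          (r:Int) * (n:Int) + ((c:Int) + 1) < (len:Int) ∧
          PySem.List.pyGetD presses ((r:Int) * (n:Int) + ((c:Int) + 1)) 0 = 1 then (1:Int) else 0)
        = if c + 1 < n then (if r * n + (c+1) < len ∧ presses.getD (r * n + (c+1)) 0 = 1 then (1:Int) else 0) else 0 := by
      by_cases h4 : c + 1 < n
      · have hc1 : ((c:Int) + 1) = ((c + 1 : Nat) : Int) := by omega
        rw [hc1, hterm r (c+1) hr (by omega), if_pos h4]
      · rw [if_neg h4, if_neg (by omega)]
    simp only [List.map_cons, List.map_nil, List.sum_cons, List.sum_nil, zero_add, add_zero]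
    rw [Hself, Hup, Hdown, Hleft, Hright]
    unfold candN
    by_cases h1 : 0 < r <;> by_cases h2 : r + 1 < n <;> by_cases h3 : 0 < c <;> by_cases h4 : c + 1 < n
    all_goals (
      simp only [h1, h2, h3, h4, if_true, if_false, List.singleton_append, List.cons_append,
        List.nil_append, List.countP_cons, List.countP_nil, decide_eq_true_eq,
        add_zero, zero_add]
      push_cast
      split_ifs <;> omega)
  · rw [if_neg (by exact_mod_cast hcn), if_neg hcn]
    rfl


theorem length_alt (board : List (List Int)) (presses : List Int) :
    (simulate_press_alt board presses).length = board.length := by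
  simp [simulate_press_alt, PySem.List.length_enumerate]

theorem rowlen_alt (board : List (List Int)) (presses : List Int) (r : Nat)
    (hr : r < board.length) :
    ((simulate_press_alt board presses).getD r []).length = ((board.getD r []).length) := by
  have hr2 : r < (simulate_press_alt board presses).length := by rw [length_alt]; exact hr
  rw [List.getD_eq_getElem _ [] hr2, List.getD_eq_getElem _ [] hr]
  unfold simulate_press_alt
  simp [PySem.List.getElem_enumerate, PySem.List.length_enumerate]

theorem grid_B (board : List (List Int)) (presses : List Int) (r c : Nat)
    (hr : r < board.length) (hc : c < (board.getD r []).length) :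
    grid (simulate_press_alt board presses) r c =
      pvFlip (cntB board presses r c) (grid board r c) := by
  have hc' : c < (board[r]'hr).length := by rwa [List.getD_eq_getElem _ [] hr] at hc
  have hr2 : r < (simulate_press_alt board presses).length := by
    simpa [simulate_press_alt, PySem.List.length_enumerate] using hr
  unfold grid
  rw [List.getD_eq_getElem _ [] hr2, List.getD_eq_getElem _ [] hr]
  unfold simulate_press_alt
  simp only [List.getElem_map, PySem.List.getElem_enumerate, PySem.List.length_enumerate,
    zero_add]
  rw [List.getD_eq_getElem _ 0 (by simpa [PySem.List.length_enumerate] using hc')]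
  simp only [List.getElem_map, PySem.List.getElem_enumerate, zero_add]
  rw [altCount_eq board presses r c hr]
  have hm : PySem.Int.mod ((cntB board presses r c : Nat) : Int) 2
      = ((cntB board presses r c % 2 : Nat) : Int) := by
    exact_mod_cast PySem.Int.mod_natCast (cntB board presses r c) 2
  rw [hm]
  rcases Nat.mod_two_eq_zero_or_one (cntB board presses r c) with hpar | hpar <;>
    simp [pvFlip, hpar, List.getElem?_eq_getElem hc']

-- ===== the two counts agree under Pre_ =====

theorem cntA_eq_cntB (board : List (List Int)) (presses : List Int)
    (hpre : Pre_simulate_press board presses) (r c : Nat) (hr : r < board.length) :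
    cntA board presses r c = cntB board presses r c := by
  by_cases hcn : c < board.length
  · unfold cntA
    have h1 : ∀ k ∈ List.range presses.length,
        (if presses.getD k 0 = 1 then
            (candN board.length (k / board.length) (k % board.length)).count (r, c) else 0)
          = if (presses.getD k 0 = 1 ∧
              (k / board.length, k % board.length) ∈ candN board.length r c) then 1 else 0 := by
      intro k hk
      rw [List.mem_range] at hk
      by_cases hp : presses.getD k 0 = 1
      · have hlt := (hpre k hk hp).1
        have hn0 : 0 < board.length := by
          rcases Nat.eq_zero_or_pos board.length with h | h
          · rw [h] at hlt; simp at hlt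
          · exact h
        have ha : k / board.length < board.length :=
          (Nat.div_lt_iff_lt_mul hn0).mpr hlt
        have hb2 : k % board.length < board.length := Nat.mod_lt _ hn0
        rw [if_pos hp, (candN_nodup board.length (k / board.length) (k % board.length)).count]
        simp only [candN_symm ha hb2 hr hcn]
        have hp2 : presses[k]?.getD 0 = 1 := by rwa [List.getD_eq_getElem?_getD] at hp
        simp [hp2]
      · rw [if_neg hp, if_neg (fun h => hp h.1)]
    rw [congrArg List.sum (List.map_congr_left h1)]
    have h2 := PySem.List.sum_map_ite_one_zero_nat
      (fun k => decide (presses.getD k 0 = 1 ∧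
        (k / board.length, k % board.length) ∈ candN board.length r c))
      (List.range presses.length)
    simp only [decide_eq_true_eq] at h2
    rw [h2, bridge_count board.length presses.length presses (candN board.length r c)
      (candN_nodup _ _ _) (candN_bounds hr hcn)]
    unfold cntB
    rw [if_pos hcn]
  · unfold cntA cntB
    rw [if_neg hcn]
    apply List.sum_eq_zero
    intro x hx
    rw [List.mem_map] at hx
    obtain ⟨k, hk, rfl⟩ := hx
    rw [List.mem_range] at hk
    by_cases hp : presses.getD k 0 = 1
    · have hlt := (hpre k hk hp).1
      have hn0 : 0 < board.length := by
        rcases Nat.eq_zero_or_pos board.length with h | h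
        · rw [h] at hlt; simp at hlt
        · exact h
      have hb2 : k % board.length < board.length := Nat.mod_lt _ hn0
      rw [if_pos hp]
      apply List.count_eq_zero_of_not_mem
      intro hmem
      rw [mem_candN] at hmem
      omega
    · rw [if_neg hp]

theorem foldA_length (n : Int) (es : List (Int × Int)) (res : List (List Int)) :
    (es.foldl (pyPressStep n) res).length = res.length := by
  induction es generalizing res with
  | nil => rfl
  | cons q es ih => rw [List.foldl_cons, ih, stepA_length]

theorem foldA_rowlen (n : Int) (es : List (Int × Int)) (res : List (List Int)) (r : Nat) :
    ((es.foldl (pyPressStep n) res).getD r []).length = ((res.getD r []).length) := by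
  induction es generalizing res with
  | nil => rfl
  | cons q es ih => rw [List.foldl_cons, ih, stepA_rowlen]

theorem length_A (board : List (List Int)) (presses : List Int) :
    (simulate_press board presses).length = board.length := by
  unfold simulate_press
  rw [foldA_length, List.map_id']

theorem rowlen_A (board : List (List Int)) (presses : List Int) (r : Nat) :
    ((simulate_press board presses).getD r []).length = ((board.getD r []).length) := by
  unfold simulate_press
  rw [foldA_rowlen, List.map_id']

theorem grid_eq_getElem (X : List (List Int)) (r c : Nat)
    (hr : r < X.length) (hc : c < (X[r]'hr).length) : grid X r c = (X[r]'hr)[c]'hc := by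
  unfold grid
  rw [List.getD_eq_getElem _ [] hr, List.getD_eq_getElem _ 0 hc]

-- ===== VERDICT (by name: the statement is the Claim_ definition above) =====
theorem simulate_press_spec : Claim_equal_simulate_press := by
  intro board presses _ hpre
  unfold Spec_simulate_press
  apply List.ext_getElem
  · rw [length_A, length_alt]
  · intro r h1 h2
    have hrb : r < board.length := by rwa [length_A] at h1
    apply List.ext_getElem
    · rw [← List.getD_eq_getElem _ [] h1, ← List.getD_eq_getElem _ [] h2,
        rowlen_A, rowlen_alt _ _ _ hrb]
    · intro c hc1 hc2
      have hcb : c < (board.getD r []).length := by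
        rw [← List.getD_eq_getElem _ [] h1, rowlen_A] at hc1
        exact hc1
      rw [← grid_eq_getElem _ _ _ h1 hc1, ← grid_eq_getElem _ _ _ h2 hc2,
        grid_A board presses hpre r c hrb hcb, grid_B board presses r c hrb hcb,
        cntA_eq_cntB board presses hpre r c hrb]
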